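-- pv_equiv track=rewrite | github.com/harjassand/AGI-Stack-Unchained | tools/orch_worldmodel/query_router_v1.py | _normalize_feature_ids
-- ===== SOURCE A (Python) =====
-- from typing import Any
--
-- def _normalize_feature_ids(value: Any) -> list[str]:
--     if isinstance(value, dict):
--         rows = value.get("feature_ids")
--     else:
--         rows = value
--     if not isinstance(rows, list):
--         raise RuntimeError("SCHEMA_FAIL:feature_ids")
--     out = sorted({str(v).strip() for v in rows if str(v).strip()})
--     return out
-- ===== SOURCE B (Python) =====
-- from typing import Any
--
-- def _normalize_feature_ids(value: Any) -> list[str]: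
--     if isinstance(value, dict):
--         rows = value.get("feature_ids")
--     else:
--         rows = value
--     if not isinstance(rows, list):
--         raise RuntimeError("SCHEMA_FAIL:feature_ids")
--     s = sorted(t for v in rows for t in [str(v).strip()] if t)
--     out: list[str] = []
--     for x in s:
--         if not out or out[-1] != x:
--             out.append(x)
--     return out
-- ===== Notes on version B (the rewrite author's own statement) =====
-- stated objective: alternative
-- what changed: Replaces the hash-set comprehension with sort-first deduplication: build the plain list of normalized non-empty strings, sort it, then collapse equal adjacent elements in one linear pass comparing to the previously kept value.
import Mathlib
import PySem

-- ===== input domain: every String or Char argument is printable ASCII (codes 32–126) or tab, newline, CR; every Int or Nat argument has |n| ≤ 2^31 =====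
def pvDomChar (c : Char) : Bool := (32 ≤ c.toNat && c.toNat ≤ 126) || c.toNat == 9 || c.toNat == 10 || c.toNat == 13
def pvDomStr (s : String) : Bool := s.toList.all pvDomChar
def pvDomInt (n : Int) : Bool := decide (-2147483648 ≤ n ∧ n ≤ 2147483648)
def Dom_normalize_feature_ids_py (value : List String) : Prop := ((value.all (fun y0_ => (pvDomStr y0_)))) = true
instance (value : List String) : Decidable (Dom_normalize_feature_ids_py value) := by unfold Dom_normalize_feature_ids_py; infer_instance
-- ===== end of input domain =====

-- B replaces A's hash-set comprehension by sort-first deduplication (sort the normalized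
-- non-empty strings, then collapse equal adjacent elements in one pass); alternative, same cost.


-- ===== PORT A =====
-- value : List String, so the dict branch does not apply and rows = value is a list
-- (the RuntimeError path is unreachable on this signature).
def normalize_feature_ids_py (value : List String) : List String :=
  PySem.List.sorted
    (PySem.Set.ofList ((value.map PySem.Str.strip).filter (fun t => !(t == ""))))
    (fun x => x) false

-- ===== PORT B =====
def normalize_feature_ids_py_alt (value : List String) : List String :=
  let s := PySem.List.sorted
    ((value.map PySem.Str.strip).filter (fun t => !(t == ""))) (fun x => x) false
  s.foldl (fun out x => if out.isEmpty || !(out.getLast? == some x) then out ++ [x] else out) []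

-- ===== PRECONDITION & SPEC =====
def Spec_normalize_feature_ids_py (value : List String) (out : List String) : Prop := out = normalize_feature_ids_py_alt value
instance (value : List String) (out : List String) : Decidable (Spec_normalize_feature_ids_py value out) := by unfold Spec_normalize_feature_ids_py; infer_instance

-- ===== CLAIM (what is proved, stated in full; the proofs are below) =====
def Claim_equal_normalize_feature_ids_py : Prop := ∀ (value : List String), Dom_normalize_feature_ids_py value → Spec_normalize_feature_ids_py value (normalize_feature_ids_py value)

-- ===== LEMMAS AND PROOFS =====

-- every element of a strictly increasing list is ≤ its last element
theorem pv_le_getLast {l : List String} {y : String}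
    (hp : l.Pairwise (· < ·)) (hl : l.getLast? = some y) : ∀ a ∈ l, a ≤ y := by
  induction l with
  | nil => simp at hl
  | cons x t ih =>
    intro a ha
    rcases List.pairwise_cons.mp hp with ⟨hx, ht⟩
    cases t with
    | nil =>
      simp at hl ha; simp [ha, hl]
    | cons z u =>
      rw [List.getLast?_cons_cons] at hl
      rcases List.mem_cons.mp ha with rfl | ha
      · exact le_of_lt (hx y (List.mem_of_getLast? (by simpa using hl)))
      · exact ih ht (by simpa using hl) a ha

-- the adjacent-dedup fold on a ≤-sorted list: strictly increasing result, same members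
theorem pv_fold_spec (s : List String) (acc : List String)
    (hs : s.Pairwise (· ≤ ·)) (hacc : acc.Pairwise (· < ·))
    (hle : ∀ a ∈ acc, ∀ b ∈ s, a ≤ b) :
    (s.foldl (fun out x => if out.isEmpty || !(out.getLast? == some x) then out ++ [x] else out) acc).Pairwise (· < ·) ∧
    (∀ x, x ∈ s.foldl (fun out x => if out.isEmpty || !(out.getLast? == some x) then out ++ [x] else out) acc ↔ x ∈ acc ∨ x ∈ s) := by
  induction s generalizing acc with
  | nil => simpa using hacc
  | cons x t ih =>
    rcases List.pairwise_cons.mp hs with ⟨hxle, ht⟩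
    simp only [List.foldl_cons]
    by_cases hkeep : acc.isEmpty || !(acc.getLast? == some x)
    · -- appended
      rw [if_pos hkeep]
      have hlast : acc.getLast? ≠ some x := by
        intro h
        rcases Bool.or_eq_true_iff.mp hkeep with h1 | h1
        · rw [List.isEmpty_iff] at h1; subst h1; simp at h
        · simp [h] at h1
      have hlt : ∀ a ∈ acc, a < x := by
        intro a ha
        cases hgl : acc.getLast? with
        | none => simp [List.getLast?_eq_none_iff] at hgl; subst hgl; simp at ha
        | some y =>
          have hay : a ≤ y := pv_le_getLast hacc hgl a ha
          have hyx : y ≤ x := hle y (List.mem_of_getLast? hgl) x (List.mem_cons_self)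
          have : y ≠ x := fun h => hlast (h ▸ hgl)
          exact lt_of_le_of_lt hay (lt_of_le_of_ne hyx this)
      have hacc' : (acc ++ [x]).Pairwise (· < ·) := by
        rw [List.pairwise_append]
        exact ⟨hacc, by simp, by simpa using hlt⟩
      have hle' : ∀ a ∈ acc ++ [x], ∀ b ∈ t, a ≤ b := by
        intro a ha b hb
        rcases List.mem_append.mp ha with ha | ha
        · exact hle a ha b (List.mem_cons_of_mem _ hb)
        · simp at ha; subst ha; exact hxle b hb
      rcases ih (acc ++ [x]) ht hacc' hle' with ⟨h1, h2⟩
      refine ⟨h1, fun z => ?_⟩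
      rw [h2 z]; simp [or_assoc, or_comm, or_left_comm]
    · -- skipped: acc.getLast? = some x, so x ∈ acc
      rw [if_neg hkeep]
      have hxin : x ∈ acc := by
        rcases Bool.or_eq_false_iff.mp (Bool.of_not_eq_true hkeep) with ⟨h1, h2⟩
        have : acc.getLast? = some x := by
          cases h : acc.getLast? == some x with
          | false => simp [h] at h2
          | true => exact beq_iff_eq.mp h
        exact List.mem_of_getLast? this
      rcases ih acc ht hacc (fun a ha b hb => hle a ha b (List.mem_cons_of_mem _ hb)) with ⟨h1, h2⟩
      refine ⟨h1, fun z => ?_⟩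
      rw [h2 z]
      constructor
      · rintro (h | h)
        · exact Or.inl h
        · exact Or.inr (List.mem_cons_of_mem _ h)
      · rintro (h | h)
        · exact Or.inl h
        · rcases List.mem_cons.mp h with rfl | h
          · exact Or.inl hxin
          · exact Or.inr h

-- ===== VERDICT (by name: the statement is the Claim_ definition above) =====
theorem normalize_feature_ids_py_spec : Claim_equal_normalize_feature_ids_py := by
  intro value _
  unfold Spec_normalize_feature_ids_py normalize_feature_ids_py normalize_feature_ids_py_alt
  set l := (value.map PySem.Str.strip).filter (fun t => !(t == "")) with hl
  set s := PySem.List.sorted l (fun x => x) false with hsdef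
  rcases pv_fold_spec s []
      (by simpa using PySem.List.sorted_pairwise l (fun x => x))
      (by simp) (by simp) with ⟨hpw, hmem⟩
  set ys := s.foldl (fun out x => if out.isEmpty || !(out.getLast? == some x) then out ++ [x] else out) [] with hys
  have hmem' : ∀ x, x ∈ ys ↔ x ∈ PySem.Set.ofList l := by
    intro x
    rw [hmem x, PySem.Set.mem_ofList]
    simp [hsdef, PySem.List.mem_sorted]
  have hperm : ys.Perm (PySem.Set.ofList l) := by
    rw [List.perm_ext_iff_of_nodup
      (List.Pairwise.imp ne_of_lt hpw) (PySem.Set.nodup_ofList l)]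
    exact hmem'
  exact PySem.List.sorted_eq_of_perm_of_pairwise_lt _ _ (fun x : String => x) hperm hpw
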